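-- pv_equiv track=rewrite | github.com/kevinddchen/project-euler | src/p109.py | twoDartPossibilities
-- ===== SOURCE A (Python) =====
-- def oneDartPossibilities(score):
--     """Counts ways one score can be reached by one dart"""
--
--     count = 0
--     if score == 0:
--         count += 1
--     else:
--         if score <= 20 or score == 25:
--             count += 1
--         if score % 2 == 0 and (score <= 40 or score == 50):
--             count += 1
--         if score % 3 == 0 and score <= 60:
--             count += 1
--
--     return count
--
-- def twoDartPossibilities(score):
--     """Counts ways one score can be reached by two darts"""
--
--     count = 0
--     for a in range(min(score // 2, 60) + 1):
--         b = score - a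
--         possA = oneDartPossibilities(a)
--         possB = oneDartPossibilities(b)
--         count += possA * possB
--         if a == b:  # adjustments for same dart
--             if possA == 2:
--                 count -= 1
--             elif possA == 3:
--                 count -= 3
--
--     return count
-- ===== SOURCE B (Python) =====
-- def twoDartPossibilities(score):
--     """Counts ways one score can be reached by two darts"""
--     throws = [0] + list(range(1, 21)) + [25] + list(range(2, 41, 2)) + [50] + list(range(3, 61, 3))
--     count = 0
--     rest = throws
--     while rest:
--         first = rest[0]
--         for t in rest:
--             if first + t == score:
--                 count += 1
--         rest = rest[1:]
--     return count
-- ===== Notes on version B (the rewrite author's own statement) =====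
-- stated objective: alternative
-- what changed: Replaces the per-score aggregation (oneDartPossibilities multiplicity counts with an explicit a==b combinatorial correction) by a direct enumeration of unordered pairs drawn from an explicit list of every dartboard segment value; the helper and the same-dart adjustment disappear.
import Mathlib
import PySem

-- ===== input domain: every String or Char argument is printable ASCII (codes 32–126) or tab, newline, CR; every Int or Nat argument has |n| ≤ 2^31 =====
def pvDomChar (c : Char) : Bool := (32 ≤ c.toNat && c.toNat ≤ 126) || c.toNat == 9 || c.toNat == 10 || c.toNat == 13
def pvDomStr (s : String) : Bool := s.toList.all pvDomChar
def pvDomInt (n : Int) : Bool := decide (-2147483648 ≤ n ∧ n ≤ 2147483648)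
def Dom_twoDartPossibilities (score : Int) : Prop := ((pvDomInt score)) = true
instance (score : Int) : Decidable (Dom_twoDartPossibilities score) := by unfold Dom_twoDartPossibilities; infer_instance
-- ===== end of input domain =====

-- B replaces A's multiplicity-counting helper and same-dart correction by a direct
-- enumeration of unordered pairs from an explicit list of every segment value (alternative
-- decomposition; same constant cost).

-- ===== PORT A =====
def oneDartPossibilities (score : Int) : Int :=
  if score = 0 then 1
  else
    (if score ≤ 20 ∨ score = 25 then 1 else 0)
    + (if PySem.Int.mod score 2 = 0 ∧ (score ≤ 40 ∨ score = 50) then 1 else 0)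
    + (if PySem.Int.mod score 3 = 0 ∧ score ≤ 60 then 1 else 0)

-- loop body of A's for-loop, kept as a named helper
def twoDartBody (score : Int) (count : Int) (a : Int) : Int :=
  let b := score - a
  let possA := oneDartPossibilities a
  let possB := oneDartPossibilities b
  let count := count + possA * possB
  if a = b then
    if possA = 2 then count - 1
    else if possA = 3 then count - 3
    else count
  else count

def twoDartPossibilities (score : Int) : Int :=
  (PySem.List.pyRange 0 (min (PySem.Int.floordiv score 2) 60 + 1) 1).foldl (twoDartBody score) 0

-- ===== PORT B =====
def altThrows : List Int :=
  [0] ++ PySem.List.pyRange 1 21 1 ++ [25] ++ PySem.List.pyRange 2 41 2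
    ++ [50] ++ PySem.List.pyRange 3 61 3

-- the while loop over the shrinking suffix `rest`
def altLoop (score : Int) (count : Int) : List Int → Int
  | [] => count
  | first :: rest' =>
      altLoop score
        ((first :: rest').foldl (fun c t => if first + t = score then c + 1 else c) count)
        rest'

def twoDartPossibilities_alt (score : Int) : Int := altLoop score 0 altThrows

-- ===== PRECONDITION & SPEC =====
def Spec_twoDartPossibilities (score : Int) (out : Int) : Prop := out = twoDartPossibilities_alt score
instance (score : Int) (out : Int) : Decidable (Spec_twoDartPossibilities score out) := by unfold Spec_twoDartPossibilities; infer_instance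

-- ===== CLAIM (what is proved, stated in full; the proofs are below) =====
def Claim_equal_twoDartPossibilities : Prop := ∀ (score : Int), Dom_twoDartPossibilities score → Spec_twoDartPossibilities score (twoDartPossibilities score)

-- ===== LEMMAS AND PROOFS =====

lemma oneDart_gt60 {s : Int} (h : 60 < s) : oneDartPossibilities s = 0 := by
  unfold oneDartPossibilities
  rw [if_neg (by omega : ¬ s = 0),
      if_neg (by omega : ¬ (s ≤ 20 ∨ s = 25)),
      if_neg (fun hc => by rcases hc with ⟨-, h2⟩; omega),
      if_neg (fun hc => by rcases hc with ⟨-, h2⟩; omega)]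
  ring

lemma Afold_high (score : Int) (h : 120 < score) :
    ∀ (l : List Int), (∀ a ∈ l, a ≤ 60) → ∀ c, l.foldl (twoDartBody score) c = c := by
  intro l
  induction l with
  | nil => intro _ c; rfl
  | cons a rest ih =>
    intro hmem c
    have ha : a ≤ 60 := hmem a (by simp)
    have hb : oneDartPossibilities (score - a) = 0 := oneDart_gt60 (by omega)
    have hstep : twoDartBody score c a = c := by
      simp only [twoDartBody]
      rw [hb, if_neg (by omega : ¬ a = score - a)]
      ring
    simp only [List.foldl_cons, hstep]
    exact ih (fun x hx => hmem x (by simp [hx])) c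

lemma innerFold_id (score first : Int) (h : score < 0 ∨ 120 < score)
    (h1 : 0 ≤ first) (h2 : first ≤ 60) :
    ∀ (l : List Int), (∀ t ∈ l, 0 ≤ t ∧ t ≤ 60) → ∀ (c : Int),
      l.foldl (fun c t => if first + t = score then c + 1 else c) c = c := by
  intro l
  induction l with
  | nil => intro _ c; rfl
  | cons t rest ih =>
    intro hmem c
    have ht := hmem t (by simp)
    simp only [List.foldl_cons, if_neg (by omega : ¬ first + t = score)]
    exact ih (fun x hx => hmem x (by simp [hx])) c

lemma altLoop_out (score : Int) (h : score < 0 ∨ 120 < score) :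
    ∀ (l : List Int), (∀ t ∈ l, 0 ≤ t ∧ t ≤ 60) → ∀ c, altLoop score c l = c := by
  intro l
  induction l with
  | nil => intro _ c; rfl
  | cons first rest ih =>
    intro hmem c
    have hf := hmem first (by simp)
    unfold altLoop
    rw [innerFold_id score first h hf.1 hf.2 (first :: rest) hmem c]
    exact ih (fun x hx => hmem x (by simp [hx])) c

set_option maxRecDepth 100000 in
set_option maxHeartbeats 2000000 in
lemma small_case : ∀ n ∈ List.range 121,
    twoDartPossibilities (n : Int) = twoDartPossibilities_alt (n : Int) := by decide

-- ===== VERDICT (by name: the statement is the Claim_ definition above) =====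
theorem twoDartPossibilities_spec : Claim_equal_twoDartPossibilities := by
  intro score _
  unfold Spec_twoDartPossibilities
  by_cases hin : 0 ≤ score ∧ score ≤ 120
  · have hs : ((score.toNat : Int)) = score := Int.toNat_of_nonneg hin.1
    have hmem : score.toNat ∈ List.range 121 := by
      rw [List.mem_range]; omega
    have := small_case score.toNat hmem
    rw [hs] at this
    exact this.symm ▸ rfl
  · have hout : score < 0 ∨ 120 < score := by omega
    have hB : twoDartPossibilities_alt score = 0 := by
      unfold twoDartPossibilities_alt
      exact altLoop_out score hout altThrows (by
        intro t ht
        simp only [altThrows, List.mem_append, List.mem_singleton, PySem.List.mem_pyRange_one,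
          PySem.List.mem_pyRange_iff_of_pos (by omega : (0:Int) < 2),
          PySem.List.mem_pyRange_iff_of_pos (by omega : (0:Int) < 3)] at ht
        omega) 0
    have hA : twoDartPossibilities score = 0 := by
      unfold twoDartPossibilities
      rcases hout with hneg | hbig
      · have hfd : PySem.Int.floordiv score 2 < 0 := by
          rw [PySem.Int.floordiv_lt_iff_lt_mul (by omega : (0:Int) < 2)]; omega
        rw [PySem.List.pyRange_one_eq_nil (by omega)]
        rfl
      · have hfd : 60 ≤ PySem.Int.floordiv score 2 := by
          rw [PySem.Int.le_floordiv_iff_mul_le (by omega : (0:Int) < 2)]; omega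
        have : min (PySem.Int.floordiv score 2) 60 + 1 = 61 := by omega
        rw [this]
        exact Afold_high score hbig _ (fun a ha => by
          rw [PySem.List.mem_pyRange_one] at ha; omega) 0
    rw [hA, hB]
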